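-- pv_equiv track=rewrite | github.com/architehc/nanochat-rs-ternary | training/generate_rust_dataset.py | quality_filter
-- ===== SOURCE A (Python) =====
-- MIN_FILE_SIZE = 100
--
-- MAX_FILE_SIZE = 150_000
--
-- def quality_filter(content):
--     """Filter for high-quality Rust code."""
--     if not content:
--         return False
--     size = len(content)
--     if size < MIN_FILE_SIZE or size > MAX_FILE_SIZE:
--         return False
--     rust_indicators = ["fn ", "let ", "use ", "struct ", "impl ", "pub ", "mod ", "trait ", "enum "]
--     count = sum(1 for ind in rust_indicators if ind in content)
--     if count < 2:
--         return False
--     first_500 = content[:500]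
--     skip = ["// Generated by", "// Auto-generated", "// DO NOT EDIT",
--             "// @generated", "GENERATED BY", "This file was auto"]
--     if any(pat in first_500 for pat in skip):
--         return False
--     lines = content.split('\n')
--     code_lines = [l for l in lines if l.strip() and not l.strip().startswith('//')]
--     if len(code_lines) < 5:
--         return False
--     return True
-- ===== SOURCE B (Python) =====
-- MIN_FILE_SIZE = 100
--
-- MAX_FILE_SIZE = 150_000
--
-- def quality_filter(content):
--     """Filter for high-quality Rust code: one streaming character scan.
--
--     Instead of split/strip and nine whole-text substring searches, a single
--     left-to-right pass over the characters runs a per-line state machine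
--     (0 = only whitespace so far, 1 = first non-blank char was '/', 2 = code
--     line, 3 = comment line) and, at each position, prefix-matches the
--     indicator and generated-file patterns directly.
--     """
--     n = len(content)
--     if n < MIN_FILE_SIZE or n > MAX_FILE_SIZE:
--         return False
--     rust_indicators = ["fn ", "let ", "use ", "struct ", "impl ", "pub ", "mod ", "trait ", "enum "]
--     skip = ["// Generated by", "// Auto-generated", "// DO NOT EDIT",
--             "// @generated", "GENERATED BY", "This file was auto"]
--     found = set()
--     code = 0
--     state = 0
--     bad = False
--     for i, ch in enumerate(content):
--         if ch == '\n':
--             if state == 1 or state == 2: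
--                 code += 1
--             state = 0
--         elif state == 0:
--             if ch == '/':
--                 state = 1
--             elif ch not in ' \t\r':
--                 state = 2
--         elif state == 1:
--             state = 3 if ch == '/' else 2
--         for ind in rust_indicators:
--             if content.startswith(ind, i):
--                 found.add(ind)
--         if not bad and any(i + len(pat) <= 500 and content.startswith(pat, i) for pat in skip):
--             bad = True
--     if state == 1 or state == 2:
--         code += 1
--     if len(found) < 2:
--         return False
--     if bad:
--         return False
--     return code >= 5
-- ===== Notes on version B (the rewrite author's own statement) =====
-- stated objective: alternative
-- what changed: A uses library passes (nine whole-content substring searches, a slice-and-search for the skip patterns, a newline split plus per-line strip()/comment-prefix filtering); B makes a single left-to-right character scan that runs a 4-state per-line DFA (blank / seen-slash / code / comment) to count code lines and prefix-matches the indicator and skip patterns at each position, enforcing the 500-character window by an index bound.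
import Mathlib
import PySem

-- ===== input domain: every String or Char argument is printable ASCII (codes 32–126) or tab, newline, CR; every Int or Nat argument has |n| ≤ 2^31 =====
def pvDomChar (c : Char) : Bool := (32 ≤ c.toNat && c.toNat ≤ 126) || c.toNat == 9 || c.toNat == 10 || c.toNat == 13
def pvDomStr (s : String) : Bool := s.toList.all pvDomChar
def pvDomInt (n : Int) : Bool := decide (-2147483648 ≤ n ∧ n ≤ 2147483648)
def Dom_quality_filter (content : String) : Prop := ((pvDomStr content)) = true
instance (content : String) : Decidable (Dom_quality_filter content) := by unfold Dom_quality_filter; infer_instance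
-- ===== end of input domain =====

-- B replaces A's library passes (per-indicator substring searches, slice search, split/strip line
-- filtering) by ONE streaming character scan with a 4-state per-line DFA and positional prefix
-- matching; objective: alternative (same asymptotic cost).

-- ===== PORT A =====
def quality_filter (content : String) : Bool :=
  if content == "" then false
  else
    let size : Int := PySem.Str.len content
    if size < 100 ∨ size > 150000 then false
    else
      let rust_indicators : List String :=
        ["fn ", "let ", "use ", "struct ", "impl ", "pub ", "mod ", "trait ", "enum "]
      let count : Int :=
        rust_indicators.foldl (fun acc ind => if PySem.Str.isIn ind content then acc + 1 else acc) 0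
      if count < 2 then false
      else
        let first_500 : String := PySem.Str.slice content none (some 500)
        let skip : List String :=
          ["// Generated by", "// Auto-generated", "// DO NOT EDIT",
           "// @generated", "GENERATED BY", "This file was auto"]
        if skip.any (fun pat => PySem.Str.isIn pat first_500) then false
        else
          let lines : List String := (PySem.Str.split? content "\n").getD []
          let code_lines : List String :=
            lines.filter (fun l =>
              !(PySem.Str.strip l == "") && !(PySem.Str.startswith (PySem.Str.strip l) "//"))
          if (code_lines.length : Int) < 5 then false
          else true

-- ===== PORT B =====
def qfInds : List String :=
  ["fn ", "let ", "use ", "struct ", "impl ", "pub ", "mod ", "trait ", "enum "]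

def qfSkip : List String :=
  ["// Generated by", "// Auto-generated", "// DO NOT EDIT",
   "// @generated", "GENERATED BY", "This file was auto"]

-- ch in ' \t\r'
def qfWs (c : Char) : Bool := c == ' ' || c == '\t' || c == '\r'

-- per-line DFA: 0 = only blanks so far, 1 = first non-blank was '/', 2 = code, 3 = comment
def qfStep (st : Nat) (c : Char) : Nat :=
  if st == 0 then (if c == '/' then 1 else if qfWs c then 0 else 2)
  else if st == 1 then (if c == '/' then 3 else 2)
  else st

-- the single scan: position i, set of indicators found, finished code lines, line state, bad flag
def qfScan : List Char → Nat → PySem.Set String → Int → Nat → Bool →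
    PySem.Set String × Int × Nat × Bool
  | [], _, found, code, st, bad => (found, code, st, bad)
  | c :: rest, i, found, code, st, bad =>
    let cs : Int × Nat :=
      if c == '\n' then (if st == 1 || st == 2 then code + 1 else code, 0)
      else (code, qfStep st c)
    let found' := qfInds.foldl (fun f ind =>
        if ind.toList.isPrefixOf (c :: rest) then PySem.Set.add f ind else f) found
    let bad' := bad || qfSkip.any (fun pat =>
        decide (i + pat.toList.length ≤ 500) && pat.toList.isPrefixOf (c :: rest))
    qfScan rest (i + 1) found' cs.1 cs.2 bad'

def quality_filter_alt (content : String) : Bool :=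
  let n : Int := PySem.Str.len content
  if n < 100 ∨ n > 150000 then false
  else
    let r := qfScan content.toList 0 PySem.Set.empty 0 0 false
    let code : Int := if r.2.2.1 == 1 || r.2.2.1 == 2 then r.2.1 + 1 else r.2.1
    if (r.1.length : Int) < 2 then false
    else if r.2.2.2 then false
    else decide (code ≥ 5)

-- ===== PRECONDITION & SPEC =====
def Spec_quality_filter (content : String) (out : Bool) : Prop := out = quality_filter_alt content
instance (content : String) (out : Bool) : Decidable (Spec_quality_filter content out) := by unfold Spec_quality_filter; infer_instance

-- ===== CLAIM (what is proved, stated in full; the proofs are below) =====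
def Claim_equal_quality_filter : Prop := ∀ (content : String), Dom_quality_filter content → Spec_quality_filter content (quality_filter content)

-- ===== LEMMAS AND PROOFS =====

-- split at newlines: (first line, remaining lines)
def pvLinesOf : List Char → List Char × List (List Char)
  | [] => ([], [])
  | c :: rest =>
    let p := pvLinesOf rest
    if c = '\n' then ([], p.1 :: p.2) else (c :: p.1, p.2)

theorem pv_go_eq : ∀ (fuel : Nat) (l cur : List Char) (acc : List (List Char)),
    l.length ≤ fuel →
    PySem.Chars.splitOn.go ['\n'] fuel l cur acc
      = acc.reverse ++ (cur.reverse ++ (pvLinesOf l).1) :: (pvLinesOf l).2 := by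
  intro fuel
  induction fuel with
  | zero =>
    intro l cur acc h
    have hl : l = [] := List.length_eq_zero_iff.mp (Nat.le_zero.mp h)
    subst hl
    simp [PySem.Chars.splitOn.go, pvLinesOf]
  | succ n ih =>
    intro l cur acc h
    cases l with
    | nil => simp [PySem.Chars.splitOn.go, pvLinesOf]
    | cons c rest =>
      by_cases hc : c = '\n'
      · subst hc
        rw [PySem.Chars.splitOn.go]
        simp only [List.isPrefixOf, List.length_singleton]
        simp [ih rest [] (cur.reverse :: acc) (by simpa using Nat.le_of_succ_le_succ h),
              pvLinesOf]
      · rw [PySem.Chars.splitOn.go]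
        have hpre : (['\n'].isPrefixOf (c :: rest)) = false := by
          simp [List.isPrefixOf]
          exact fun he => hc he.symm
        rw [if_neg (by simp [hpre])]
        rw [ih rest (c :: cur) acc (by simpa using Nat.le_of_succ_le_succ h)]
        simp [pvLinesOf, if_neg hc]

theorem pv_splitOn_eq (s : List Char) :
    PySem.Chars.splitOn s ['\n'] = (pvLinesOf s).1 :: (pvLinesOf s).2 := by
  unfold PySem.Chars.splitOn
  rw [pv_go_eq (s.length + 1) s [] [] (by omega)]
  simp

theorem pvLinesOf_fst (s : List Char) :
    (pvLinesOf s).1 = s.takeWhile (fun c => !(c == '\n')) := by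
  induction s with
  | nil => simp [pvLinesOf]
  | cons c rest ih =>
    by_cases hc : c = '\n' <;>
      simp [pvLinesOf, hc, ih]

theorem pv_pieces_infix (s : List Char) :
    ∀ p ∈ (pvLinesOf s).1 :: (pvLinesOf s).2, p <:+: s := by
  induction s with
  | nil => simp [pvLinesOf]
  | cons c rest ih =>
    intro p hp
    by_cases hc : c = '\n'
    · simp only [pvLinesOf, hc] at hp
      rcases List.mem_cons.mp hp with h | h
      · subst h; exact List.nil_infix
      · exact List.infix_cons (ih p h)
    · simp only [pvLinesOf, if_neg hc] at hp
      rcases List.mem_cons.mp hp with h | h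
      · subst h
        refine List.IsPrefix.isInfix ?_
        refine List.cons_prefix_cons.mpr ⟨rfl, ?_⟩
        rw [pvLinesOf_fst]; exact List.takeWhile_prefix _
      · exact List.infix_cons (ih p (List.mem_cons_of_mem _ h))

theorem pv_pieces_no_newline (s : List Char) :
    ∀ p ∈ (pvLinesOf s).1 :: (pvLinesOf s).2, '\n' ∉ p := by
  induction s with
  | nil => simp [pvLinesOf]
  | cons c rest ih =>
    intro p hp
    by_cases hc : c = '\n'
    · simp only [pvLinesOf, hc] at hp
      rcases List.mem_cons.mp hp with h | h
      · subst h; simp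
      · exact ih p h
    · simp only [pvLinesOf, if_neg hc] at hp
      rcases List.mem_cons.mp hp with h | h
      · subst h
        intro hm
        rcases List.mem_cons.mp hm with h1 | h1
        · exact hc h1.symm
        · exact ih _ List.mem_cons_self h1
      · exact ih p (List.mem_cons_of_mem _ h)

-- generic set-accumulation fold: membership and nodup
theorem pv_mem_fold_add (inds : List String) (p : String → Bool) (f : PySem.Set String) (x : String) :
    x ∈ inds.foldl (fun f ind => if p ind then PySem.Set.add f ind else f) f
      ↔ x ∈ f ∨ (x ∈ inds ∧ p x = true) := by
  induction inds generalizing f with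
  | nil => simp
  | cons ind inds ih =>
    simp only [List.foldl_cons, ih]
    by_cases hi : p ind = true
    · rw [if_pos hi, PySem.Set.mem_add]
      constructor
      · rintro ((h | rfl) | h)
        · exact Or.inl h
        · exact Or.inr ⟨List.mem_cons_self, hi⟩
        · exact Or.inr ⟨List.mem_cons_of_mem _ h.1, h.2⟩
      · rintro (h | ⟨hm, hx⟩)
        · exact Or.inl (Or.inl h)
        · rcases List.mem_cons.mp hm with rfl | hm'
          · exact Or.inl (Or.inr rfl)
          · exact Or.inr ⟨hm', hx⟩
    · rw [if_neg hi]
      constructor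
      · rintro (h | h)
        · exact Or.inl h
        · exact Or.inr ⟨List.mem_cons_of_mem _ h.1, h.2⟩
      · rintro (h | ⟨hm, hx⟩)
        · exact Or.inl h
        · rcases List.mem_cons.mp hm with rfl | hm'
          · exact absurd hx hi
          · exact Or.inr ⟨hm', hx⟩

theorem pv_nodup_add {α : Type} [BEq α] [LawfulBEq α] {s : PySem.Set α} (h : s.Nodup) (x : α) :
    (PySem.Set.add s x).Nodup := by
  unfold PySem.Set.add
  by_cases hc : PySem.Set.contains s x = true
  · rw [if_pos hc]; exact h
  · rw [if_neg hc]
    refine List.Nodup.append h (List.nodup_singleton x) ?_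
    intro a ha hb
    rw [List.mem_singleton] at hb
    subst hb
    exact hc ((PySem.Set.contains_iff s a).mpr ha)

theorem pv_nodup_fold_add (inds : List String) (p : String → Bool) (f : PySem.Set String)
    (h : f.Nodup) :
    (inds.foldl (fun f ind => if p ind then PySem.Set.add f ind else f) f).Nodup := by
  induction inds generalizing f with
  | nil => exact h
  | cons ind inds ih =>
    simp only [List.foldl_cons]
    by_cases hi : p ind = true
    · rw [if_pos hi]; exact ih _ (pv_nodup_add h ind)
    · rw [if_neg hi]; exact ih _ h

-- the scan's found-set: x is in it iff it was there or is an indicator occurring in s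
theorem qfScan_found_mem : ∀ (s : List Char) (i : Nat) (f : PySem.Set String) (code : Int)
    (st : Nat) (bad : Bool) (x : String),
    x ∈ (qfScan s i f code st bad).1 ↔ x ∈ f ∨ (x ∈ qfInds ∧ x.toList <:+: s) := by
  intro s
  induction s with
  | nil =>
    intro i f code st bad x
    simp only [qfScan]
    constructor
    · exact Or.inl
    · rintro (h | ⟨hm, hi⟩)
      · exact h
      · exfalso
        rw [List.infix_nil] at hi
        fin_cases hm <;> simp at hi
  | cons c rest ih =>
    intro i f code st bad x
    rw [qfScan]
    rw [ih, pv_mem_fold_add]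
    simp only [List.isPrefixOf_iff_prefix, List.infix_cons_iff]
    constructor
    · rintro ((h | ⟨hm, hp⟩) | ⟨hm, hi⟩)
      · exact Or.inl h
      · exact Or.inr ⟨hm, Or.inl (by simpa using hp)⟩
      · exact Or.inr ⟨hm, Or.inr hi⟩
    · rintro (h | ⟨hm, hp | hi⟩)
      · exact Or.inl (Or.inl h)
      · exact Or.inl (Or.inr ⟨hm, by simpa using hp⟩)
      · exact Or.inr ⟨hm, hi⟩

theorem qfScan_found_nodup : ∀ (s : List Char) (i : Nat) (f : PySem.Set String) (code : Int)
    (st : Nat) (bad : Bool), f.Nodup → (qfScan s i f code st bad).1.Nodup := by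
  intro s
  induction s with
  | nil => intro i f code st bad h; simpa [qfScan] using h
  | cons c rest ih =>
    intro i f code st bad h
    rw [qfScan]
    exact ih _ _ _ _ _ (pv_nodup_fold_add _ _ _ h)

theorem qfScan_found_length (s : List Char) :
    ((qfScan s 0 PySem.Set.empty 0 0 false).1.length : Nat)
      = List.countP (fun ind => decide (ind.toList <:+: s)) qfInds := by
  show (((qfScan s 0 ([] : PySem.Set String) 0 0 false).1.length : Nat)) = _
  rw [List.countP_eq_length_filter]
  apply List.Perm.length_eq
  have hnd : qfInds.Nodup := by decide
  rw [List.perm_ext_iff_of_nodup (qfScan_found_nodup s 0 ([] : PySem.Set String) 0 0 false List.nodup_nil)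
    (hnd.filter _)]
  intro a
  rw [qfScan_found_mem, List.mem_filter]
  simp

theorem qfScan_bad : ∀ (s : List Char) (i : Nat) (f : PySem.Set String) (code : Int)
    (st : Nat) (bad : Bool),
    (qfScan s i f code st bad).2.2.2
      = (bad || qfSkip.any (fun pat => PySem.Chars.isIn pat.toList (s.take (500 - i)))) := by
  intro s
  induction s with
  | nil =>
    intro i f code st bad
    simp only [qfScan, List.take_nil]
    rw [Bool.eq_iff_iff]
    simp only [Bool.or_eq_true, List.any_eq_true, PySem.Chars.isIn_iff_infix, List.infix_nil]
    constructor
    · exact Or.inl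
    · rintro (h | ⟨pat, hm, hi⟩)
      · exact h
      · exfalso; fin_cases hm <;> simp at hi
  | cons c rest ih =>
    intro i f code st bad
    rw [qfScan]
    rw [ih]
    rw [Bool.eq_iff_iff]
    simp only [Bool.or_eq_true, List.any_eq_true, PySem.Chars.isIn_iff_infix,
      Bool.and_eq_true, decide_eq_true_eq, List.isPrefixOf_iff_prefix, or_assoc]
    refine or_congr_right ?_
    constructor
    · rintro (⟨pat, hm, hle, hp⟩ | ⟨pat, hm, hi⟩)
      · exact ⟨pat, hm, List.IsPrefix.isInfix (List.prefix_take_iff.mpr ⟨hp, by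
          have : 1 ≤ pat.toList.length := by fin_cases hm <;> decide
          omega⟩)⟩
      · refine ⟨pat, hm, ?_⟩
        by_cases hi500 : i < 500
        · have hk : 500 - i = (500 - (i + 1)) + 1 := by omega
          rw [hk, List.take_succ_cons]
          exact List.infix_cons hi
        · have hz : 500 - (i + 1) = 0 := by omega
          rw [hz, List.take_zero, List.infix_nil] at hi
          rw [hi]
          exact List.nil_infix
    · rintro ⟨pat, hm, hi⟩
      have hne : 1 ≤ pat.toList.length := by fin_cases hm <;> decide
      by_cases hi500 : i < 500
      · have hk : 500 - i = (500 - (i + 1)) + 1 := by omega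
        rw [hk, List.take_succ_cons, List.infix_cons_iff] at hi
        rcases hi with hp | hi
        · have h2 : pat.toList <+: (c :: rest).take ((500 - (i + 1)) + 1) := by
            rw [List.take_succ_cons]; exact hp
          rw [List.prefix_take_iff] at h2
          exact Or.inl ⟨pat, hm, by omega, h2.1⟩
        · exact Or.inr ⟨pat, hm, hi⟩
      · have hz : 500 - i = 0 := by omega
        rw [hz, List.take_zero, List.infix_nil] at hi
        exfalso
        rw [hi] at hne
        simp at hne

-- line classification by the DFA
def lineIsCode (st : Nat) (l : List Char) : Bool :=
  let e := l.foldl qfStep st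
  e == 1 || e == 2

theorem qfScan_code : ∀ (s : List Char) (i : Nat) (f : PySem.Set String) (code : Int)
    (st : Nat) (bad : Bool),
    (if (qfScan s i f code st bad).2.2.1 == 1 || (qfScan s i f code st bad).2.2.1 == 2
     then (qfScan s i f code st bad).2.1 + 1 else (qfScan s i f code st bad).2.1)
      = code + (if lineIsCode st (pvLinesOf s).1 then 1 else 0)
          + (((pvLinesOf s).2).map (fun l => if lineIsCode 0 l then (1 : Int) else 0)).sum := by
  intro s
  induction s with
  | nil =>
    intro i f code st bad
    simp only [qfScan, pvLinesOf, lineIsCode, List.foldl_nil, List.map_nil, List.sum_nil, add_zero]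
    by_cases h : (st == 1 || st == 2) = true <;> simp [h]
  | cons c rest ih =>
    intro i f code st bad
    rw [qfScan]
    by_cases hc : c = '\n'
    · subst hc
      rw [if_pos (by rfl : ('\n' == '\n') = true)]
      rw [ih]
      simp only [pvLinesOf, reduceIte, List.map_cons, List.sum_cons]
      have hnil : lineIsCode st ([] : List Char) = (st == 1 || st == 2) := by
        simp [lineIsCode]
      rw [hnil]
      by_cases hst : (st == 1 || st == 2) = true
      · rw [if_pos hst, if_pos hst]; ring
      · rw [if_neg hst, if_neg hst]; ring
    · have hcb : (c == '\n') = false := by simp [hc]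
      simp only [hcb, Bool.false_eq_true, if_false]
      rw [ih]
      simp only [pvLinesOf, if_neg hc]
      have hcons : lineIsCode st (c :: (pvLinesOf rest).1) = lineIsCode (qfStep st c) (pvLinesOf rest).1 := by
        simp [lineIsCode]
      rw [hcons]

theorem pvCharEq (c d : Char) (h : c.toNat = d.toNat) : c = d :=
  Char.ext (UInt32.toNat_inj.mp h)

-- on domain characters other than '\n', Python's whitespace test is exactly ' ','\t','\r'
theorem pv_isspace_eq_qfWs (c : Char) (hd : pvDomChar c = true) (hc : c ≠ '\n') :
    PySem.Chars.isspace c = qfWs c := by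
  unfold pvDomChar at hd
  simp only [Bool.or_eq_true, Bool.and_eq_true, decide_eq_true_eq, beq_iff_eq] at hd
  by_cases h9 : c.toNat = 9
  · rw [pvCharEq c '\t' (h9.trans rfl)]; decide
  · by_cases h13 : c.toNat = 13
    · rw [pvCharEq c '\r' (h13.trans rfl)]; decide
    · by_cases h32 : c.toNat = 32
      · rw [pvCharEq c ' ' (h32.trans rfl)]; decide
      · have h10 : c.toNat ≠ 10 := fun h => hc (pvCharEq c '\n' (h.trans rfl))
        have hrange : 33 ≤ c.toNat ∧ c.toNat ≤ 126 := by omega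
        unfold PySem.Chars.isspace qfWs
        have hs : (c == ' ') = false := by
          rw [beq_eq_false_iff_ne]; exact fun h => h32 (by rw [h]; decide)
        have ht : (c == '\t') = false := by
          rw [beq_eq_false_iff_ne]; exact fun h => h9 (by rw [h]; decide)
        have hr : (c == '\r') = false := by
          rw [beq_eq_false_iff_ne]; exact fun h => h13 (by rw [h]; decide)
        simp only [hs, ht, hr, Bool.or_self]
        simp only [Bool.or_eq_false_iff, decide_eq_false_iff_not, Bool.and_eq_false_iff]
        omega

-- states 2 and 3 are absorbing
theorem pv_foldl_qfStep_two (l : List Char) : l.foldl qfStep 2 = 2 := by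
  induction l with
  | nil => rfl
  | cons c t ih => simpa [qfStep] using ih

theorem pv_foldl_qfStep_three (l : List Char) : l.foldl qfStep 3 = 3 := by
  induction l with
  | nil => rfl
  | cons c t ih => simpa [qfStep] using ih

-- leading whitespace leaves state 0
theorem pv_foldl_qfStep_lstrip (l : List Char) (hws : ∀ c ∈ l, PySem.Chars.isspace c = qfWs c) :
    l.foldl qfStep 0 = (l.dropWhile PySem.Chars.isspace).foldl qfStep 0 := by
  induction l with
  | nil => rfl
  | cons c t ih =>
    by_cases hsp : PySem.Chars.isspace c = true
    · have hq : qfWs c = true := (hws c List.mem_cons_self) ▸ hsp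
      have hslash : (c == '/') = false := by
        rw [beq_eq_false_iff_ne]
        intro h; subst h; simp [qfWs] at hq
      have hstep : qfStep 0 c = 0 := by simp [qfStep, hslash, hq]
      rw [List.foldl_cons, hstep, List.dropWhile_cons_of_pos hsp]
      exact ih (fun d hd => hws d (List.mem_cons_of_mem _ hd))
    · rw [List.dropWhile_cons_of_neg hsp]

-- recursion equation for rstrip
theorem pv_rstrip_cons (c : Char) (t : List Char) :
    PySem.Chars.rstrip (c :: t)
      = if PySem.Chars.rstrip t = [] then (if PySem.Chars.isspace c then [] else [c])
        else c :: PySem.Chars.rstrip t := by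
  unfold PySem.Chars.rstrip
  rw [List.reverse_cons, List.dropWhile_append]
  by_cases h : (List.dropWhile PySem.Chars.isspace t.reverse) = []
  · rw [h]
    by_cases hc : PySem.Chars.isspace c = true <;>
      simp [List.dropWhile, hc]
  · rw [if_neg (by simp [h]), if_neg (by simp [h])]
    simp
theorem pv_lineIsCode_eq (l : List Char) (hnl : '\n' ∉ l) (hdom : ∀ c ∈ l, pvDomChar c = true) :
    lineIsCode 0 l
      = (!(PySem.Chars.strip l).isEmpty && !(['/', '/'].isPrefixOf (PySem.Chars.strip l))) := by
  have hws : ∀ c ∈ l, PySem.Chars.isspace c = qfWs c := fun c hc =>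
    pv_isspace_eq_qfWs c (hdom c hc) (fun h => hnl (h ▸ hc))
  have hstrip : PySem.Chars.strip l
      = PySem.Chars.rstrip (l.dropWhile PySem.Chars.isspace) := rfl
  simp only [lineIsCode]
  rw [pv_foldl_qfStep_lstrip l hws, hstrip]
  -- we only reason about d := l.dropWhile isspace from here on
  rcases hdw : l.dropWhile PySem.Chars.isspace with _ | ⟨c, t⟩
  · simp [PySem.Chars.rstrip]
  · have hcns : PySem.Chars.isspace c = false := by
      have h2 := List.head_dropWhile_not (p := PySem.Chars.isspace) (l := l) (by simp [hdw])
      simp only [hdw] at h2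
      simpa using h2
    have hone : qfStep 0 c = if c == '/' then 1 else 2 := by
      have hq : qfWs c = false :=
        (hws c ((List.dropWhile_suffix PySem.Chars.isspace).subset
          (hdw ▸ List.mem_cons_self))) ▸ hcns
      simp [qfStep, hq]
    have hspsl : PySem.Chars.isspace '/' = false := by decide
    by_cases hsl : (c == '/') = true
    · -- first non-blank char is '/'
      have hc : c = '/' := by simpa using hsl
      subst hc
      rcases t with _ | ⟨c2, t2⟩
      · -- lone '/': state 1, code
        decide
      · by_cases hsl2 : (c2 == '/') = true
        · -- '//': comment
          have hc2 : c2 = '/' := by simpa using hsl2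
          subst hc2
          rw [List.foldl_cons, List.foldl_cons, hone]
          rw [if_pos (by decide)]
          rw [show qfStep 1 '/' = 3 from rfl, pv_foldl_qfStep_three]
          rw [pv_rstrip_cons, pv_rstrip_cons]
          by_cases h2 : PySem.Chars.rstrip t2 = []
          · simp [h2]
            decide
          · simp [h2, List.isPrefixOf]
        · -- '/x': code
          have hsl2f : (c2 == '/') = false := by simpa using hsl2
          have hne2 : ¬ '/' = c2 := fun h => by simp [← h] at hsl2f
          have hc2 : qfStep 1 c2 = 2 := by simp [qfStep, hsl2f]
          rw [List.foldl_cons, List.foldl_cons, hone]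
          rw [if_pos (by decide)]
          rw [hc2, pv_foldl_qfStep_two]
          rw [pv_rstrip_cons, pv_rstrip_cons]
          by_cases h3 : PySem.Chars.rstrip t2 = []
          · by_cases hws2 : PySem.Chars.isspace c2 = true
            · simp [h3, hws2]
              decide
            · simp [h3, hws2, List.isPrefixOf, hne2]
          · simp [h3, List.isPrefixOf, hne2]
    · -- first non-blank char is not '/': code, and strip starts with it
      have hslf : (c == '/') = false := by simpa using hsl
      have hne : ¬ '/' = c := fun h => by simp [← h] at hslf
      rw [List.foldl_cons, hone, if_neg (by simp [hslf]), pv_foldl_qfStep_two, pv_rstrip_cons]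
      by_cases h2 : PySem.Chars.rstrip t = []
      · simp [h2, hcns, List.isPrefixOf]
      · simp [h2, List.isPrefixOf, hne]

-- bridging: A's three tests, rewritten to the scan's three accumulators
theorem pv_count_eq (content : String) :
    (["fn ", "let ", "use ", "struct ", "impl ", "pub ", "mod ", "trait ", "enum "] : List String).foldl
        (fun acc ind => if PySem.Str.isIn ind content then acc + 1 else acc) (0 : Int)
      = ((qfScan content.toList 0 PySem.Set.empty 0 0 false).1.length : Int) := by
  rw [qfScan_found_length, PySem.List.foldl_count_if, zero_add]
  norm_cast
  unfold qfInds
  refine List.countP_congr (fun x hx => ?_)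
  simp only [PySem.Str.isIn_iff_infix, decide_eq_true_eq]

theorem pv_skip_eq (content : String) :
    (["// Generated by", "// Auto-generated", "// DO NOT EDIT",
      "// @generated", "GENERATED BY", "This file was auto"] : List String).any
        (fun pat => PySem.Str.isIn pat (PySem.Str.slice content none (some 500)))
      = (qfScan content.toList 0 PySem.Set.empty 0 0 false).2.2.2 := by
  rw [qfScan_bad, Bool.false_or]
  have hsl : (PySem.Str.slice content none (some 500)).toList = content.toList.take 500 := by
    simp [pysem]
  rw [Bool.eq_iff_iff]
  simp only [qfSkip, List.any_eq_true, PySem.Str.isIn_iff_infix, PySem.Chars.isIn_iff_infix, hsl]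

theorem pv_strip_empty_eq (p : List Char) :
    (PySem.Str.strip (String.ofList p) == "") = (PySem.Chars.strip p).isEmpty := by
  rw [Bool.eq_iff_iff, beq_iff_eq, List.isEmpty_iff]
  constructor
  · intro h
    have := congrArg String.toList h
    simpa [PySem.Str.toList_strip] using this
  · intro h
    have h2 : (PySem.Str.strip (String.ofList p)).toList = ("" : String).toList := by
      simpa [PySem.Str.toList_strip] using h
    exact String.toList_inj.mp h2

theorem pv_pred_eq (p : List Char) :
    (!(PySem.Str.strip (String.ofList p) == "")
      && !(PySem.Str.startswith (PySem.Str.strip (String.ofList p)) "//"))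
      = (!(PySem.Chars.strip p).isEmpty && !(['/', '/'].isPrefixOf (PySem.Chars.strip p))) := by
  rw [pv_strip_empty_eq]
  have h2 : PySem.Str.startswith (PySem.Str.strip (String.ofList p)) "//"
      = ['/', '/'].isPrefixOf (PySem.Chars.strip p) := by
    rw [PySem.Str.startswith_eq]
    rw [PySem.Str.toList_strip]
    simp [PySem.Chars.startswith]
  rw [h2]

theorem pv_code_eq (content : String) (hdom : pvDomStr content = true) :
    ((((PySem.Str.split? content "\n").getD []).filter (fun l =>
        !(PySem.Str.strip l == "") && !(PySem.Str.startswith (PySem.Str.strip l) "//"))).length : Int)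
      = (if (qfScan content.toList 0 PySem.Set.empty 0 0 false).2.2.1 == 1
            || (qfScan content.toList 0 PySem.Set.empty 0 0 false).2.2.1 == 2
         then (qfScan content.toList 0 PySem.Set.empty 0 0 false).2.1 + 1
         else (qfScan content.toList 0 PySem.Set.empty 0 0 false).2.1) := by
  rw [qfScan_code]
  have hlines : (PySem.Str.split? content "\n").getD []
      = ((pvLinesOf content.toList).1 :: (pvLinesOf content.toList).2).map String.ofList := by
    rw [PySem.Str.split?]
    rw [show ("\n" : String).toList = ['\n'] from rfl]
    rw [PySem.Chars.split?]
    rw [if_neg (by decide)]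
    rw [pv_splitOn_eq]
    rfl
  rw [hlines]
  rw [← List.countP_eq_length_filter, List.countP_map]
  have hpt : ∀ p ∈ (pvLinesOf content.toList).1 :: (pvLinesOf content.toList).2,
      ((fun l => !(PySem.Str.strip l == "") &&
          !(PySem.Str.startswith (PySem.Str.strip l) "//")) ∘ String.ofList) p
        = lineIsCode 0 p := by
    intro p hp
    have hnl := pv_pieces_no_newline content.toList p hp
    have hdomp : ∀ c ∈ p, pvDomChar c = true := by
      intro c hc
      have hsub := (pv_pieces_infix content.toList p hp).subset hc
      unfold pvDomStr at hdom
      exact List.all_eq_true.mp hdom c hsub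
    rw [pv_lineIsCode_eq p hnl hdomp]
    exact pv_pred_eq p
  rw [List.countP_congr (fun x hx => by rw [hpt x hx])]
  rw [List.countP_cons, PySem.List.sum_map_ite_one_zero]
  by_cases hfc : lineIsCode 0 (pvLinesOf content.toList).1 = true
  · simp only [hfc, if_pos]
    push_cast
    ring
  · simp only [hfc, Bool.false_eq_true, if_false]
    push_cast
    ring

-- ===== VERDICT (by name: the statement is the Claim_ definition above) =====
theorem quality_filter_spec : Claim_equal_quality_filter := by
  intro content hdom
  unfold Spec_quality_filter quality_filter quality_filter_alt
  simp only []
  by_cases h0 : content = ""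
  · subst h0; decide
  · rw [if_neg (by simpa using h0)]
    by_cases hsz : (PySem.Str.len content < 100 ∨ PySem.Str.len content > 150000)
    · rw [if_pos hsz, if_pos hsz]
    · rw [if_neg hsz, if_neg hsz]
      rw [pv_count_eq content, pv_skip_eq content,
        pv_code_eq content (by exact hdom)]
      set r := qfScan content.toList 0 PySem.Set.empty 0 0 false with hr
      set cl : Int := (if r.2.2.1 == 1 || r.2.2.1 == 2 then r.2.1 + 1 else r.2.1) with hcl
      by_cases h2 : ((r.1.length : Int) < 2) <;>
        by_cases h5 : (cl < 5) <;>
          cases hb : r.2.2.2 <;>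
            simp [h2, h5, hb] <;> omega
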